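-- pv_equiv track=rewrite | github.com/sin0105/fun411-1- | week13/test.py | sum_d_product
-- ===== SOURCE A (Python) =====
-- def sum_d_product(m: list[list[int]]):
--     if len(m) == 2:
--         result = (m[0][0] * m[1][1]) + (m[0][1] * m[1][0])
--         return result
--
--     ans = []
--     for i in range(0,len(m),2):
--         skip1 = range(0,len(m),2)
--         skip2 = range(1,len(m),2)
--         solution = list(map(lambda x,y: (m[i][x] * m[i+1][y]) +  (m[i][y] * m[i+1][x]), skip1, skip2))
--         ans.extend([solution])
--
--     result = sum_d_product(ans)
--     return result
-- ===== SOURCE B (Python) =====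
-- def sum_d_product(m: list[list[int]]):
--     # Iterative bottom-up reduction: shrink the matrix in place of recursion.
--     while len(m) > 2:
--         half = len(m) // 2
--         m = [[m[i][2 * j] * m[i + 1][2 * j + 1] + m[i][2 * j + 1] * m[i + 1][2 * j]
--               for j in range(half)]
--              for i in range(0, len(m), 2)]
--     return m[0][0] * m[1][1] + m[0][1] * m[1][0]
-- ===== Notes on version B (the rewrite author's own statement) =====
-- stated objective: alternative
-- what changed: Replaces A's recursion (and its zip of two stride-2 ranges) by an iterative while-loop that reassigns a working matrix, computing each reduced entry from explicit column indices 2j/2j+1 over range(len(m)//2).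
import Mathlib
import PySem

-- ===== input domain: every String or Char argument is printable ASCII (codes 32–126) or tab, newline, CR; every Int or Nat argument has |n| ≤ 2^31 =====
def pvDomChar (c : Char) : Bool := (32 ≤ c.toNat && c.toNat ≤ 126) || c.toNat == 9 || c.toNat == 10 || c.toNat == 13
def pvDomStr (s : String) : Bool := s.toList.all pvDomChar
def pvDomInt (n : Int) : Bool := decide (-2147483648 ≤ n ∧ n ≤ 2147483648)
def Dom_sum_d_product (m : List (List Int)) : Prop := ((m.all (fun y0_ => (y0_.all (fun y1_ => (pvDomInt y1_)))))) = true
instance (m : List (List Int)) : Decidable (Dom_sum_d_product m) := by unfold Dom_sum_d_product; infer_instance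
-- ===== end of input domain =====

-- B replaces A's recursion by an iterative bottom-up loop with explicit 2j/2j+1 column
-- indexing; equivalence is proved on the inputs where A returns (power-of-two height,
-- rows at least that long).

-- ===== PORT A =====
-- m[i][j] — used only under Pre_, where every access is in range
def pvIdx (m : List (List Int)) (i j : Int) : Int :=
  PySem.List.pyGetD (PySem.List.pyGetD m i []) j 0

-- base case: (m[0][0]*m[1][1]) + (m[0][1]*m[1][0])
def pvBase (m : List (List Int)) : Int :=
  pvIdx m 0 0 * pvIdx m 1 1 + pvIdx m 0 1 * pvIdx m 1 0

-- the 'ans' built by A's for-loop: zipped map over skip1 = range(0,len,2), skip2 = range(1,len,2)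
def pvAnsA (m : List (List Int)) : List (List Int) :=
  (PySem.List.pyRange 0 m.length 2).foldl (fun ans i =>
    ans ++ [List.zipWith
      (fun x y => pvIdx m i x * pvIdx m (i+1) y + pvIdx m i y * pvIdx m (i+1) x)
      (PySem.List.pyRange 0 m.length 2) (PySem.List.pyRange 1 m.length 2)]) []

-- A's recursion, with fuel as a pure totality guard (len+1 fuel is always enough on Pre_)
def pvGoA : Nat → List (List Int) → Int
  | 0, _ => 0
  | f+1, m => if m.length = 2 then pvBase m else pvGoA f (pvAnsA m)

def sum_d_product (m : List (List Int)) : Int := pvGoA (m.length + 1) m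

-- ===== PORT B =====
-- one reduced row: [m[i][2j]*m[i+1][2j+1] + m[i][2j+1]*m[i+1][2j] for j in range(half)]
def pvRowB (m : List (List Int)) (i half : Int) : List Int :=
  (PySem.List.pyRange 0 half 1).map (fun j =>
    pvIdx m i (2*j) * pvIdx m (i+1) (2*j+1) + pvIdx m i (2*j+1) * pvIdx m (i+1) (2*j))

-- the reduced matrix of one while-iteration
def pvStepB (m : List (List Int)) : List (List Int) :=
  (PySem.List.pyRange 0 m.length 2).map (fun i =>
    pvRowB m i (PySem.Int.floordiv m.length 2))

theorem pvStepB_length (m : List (List Int)) :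
    (pvStepB m).length = (m.length + 1) / 2 := by
  simp only [pvStepB, List.length_map,
    PySem.List.pyRange_of_pos 0 (m.length : Int) (by norm_num : (0:Int) < 2),
    List.length_range]
  split <;> omega

def sum_d_product_alt (m : List (List Int)) : Int :=
  if h : 2 < m.length then sum_d_product_alt (pvStepB m) else pvBase m
termination_by m.length
decreasing_by simp only [pvStepB_length]; omega

-- ===== PRECONDITION & SPEC =====
-- Pre_ = exactly the inputs on which A returns: the height is a power of two (≥ 2,
-- otherwise A recurses forever or indexes past the rows) and every row has at least
-- that many columns (A reads columns 0..len(m)-1 of each row).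
def Pre_sum_d_product (m : List (List Int)) : Prop :=
  2 ≤ m.length ∧ m.length = 2 ^ (Nat.log2 m.length) ∧ ∀ row ∈ m, m.length ≤ row.length
instance (m : List (List Int)) : Decidable (Pre_sum_d_product m) := by
  unfold Pre_sum_d_product; infer_instance

def pvWitness_sum_d_product : List (List Int) := [[1, 2], [3, 4]]

def Spec_sum_d_product (m : List (List Int)) (out : Int) : Prop := out = sum_d_product_alt m
instance (m : List (List Int)) (out : Int) : Decidable (Spec_sum_d_product m out) := by
  unfold Spec_sum_d_product; infer_instance

-- ===== CLAIM (what is proved, stated in full; the proofs are below) =====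
def Claim_equal_sum_d_product : Prop := ∀ (m : List (List Int)), Dom_sum_d_product m → Pre_sum_d_product m → Spec_sum_d_product m (sum_d_product m)

-- ===== LEMMAS AND PROOFS =====

-- A's one-level reduction equals B's (unconditionally: both truncate to ⌊len/2⌋ columns)
theorem pvAnsA_eq_pvStepB (m : List (List Int)) : pvAnsA m = pvStepB m := by
  unfold pvAnsA pvStepB
  rw [PySem.List.foldl_append_singleton_eq_map]
  rw [List.nil_append]
  apply List.map_congr_left
  intro i _
  unfold pvRowB
  apply List.ext_getElem
  · simp [PySem.List.pyRange_of_pos 0 (m.length : Int) (by norm_num : (0:Int) < 2),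
      PySem.List.pyRange_of_pos 1 (m.length : Int) (by norm_num : (0:Int) < 2),
      PySem.List.length_pyRange_one]
    split <;> split <;> omega
  · intro k h1 h2
    simp only [List.getElem_zipWith, List.getElem_map,
      PySem.List.pyRange_of_pos 0 (m.length : Int) (by norm_num : (0:Int) < 2),
      PySem.List.pyRange_of_pos 1 (m.length : Int) (by norm_num : (0:Int) < 2),
      PySem.List.pyRange_one, List.getElem_range]
    ring_nf

-- Pre_ is preserved by one reduction step
theorem pre_step (m : List (List Int)) (hpre : Pre_sum_d_product m)
    (h4 : 4 ≤ m.length) : Pre_sum_d_product (pvStepB m) := by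
  obtain ⟨h2, hpow, _⟩ := hpre
  have hk2 : 2 ≤ Nat.log2 m.length := by
    by_contra h
    interval_cases h : Nat.log2 m.length <;> omega
  have heven : 2 ∣ m.length := by
    rw [hpow]; exact dvd_pow_self 2 (by omega)
  have hlen : (pvStepB m).length = m.length / 2 := by
    rw [pvStepB_length]; omega
  have hhalf : m.length / 2 = 2 ^ (Nat.log2 m.length - 1) := by
    have h1 : m.length = 2 ^ (Nat.log2 m.length - 1) * 2 := by
      conv_lhs => rw [hpow]
      rw [← pow_succ]
      congr 1
      omega
    conv_lhs => rw [h1]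
    rw [Nat.mul_div_cancel _ (by norm_num)]
  have hfd : PySem.Int.floordiv (m.length : Int) 2 = ((m.length / 2 : Nat) : Int) := by
    exact_mod_cast PySem.Int.floordiv_natCast m.length 2
  refine ⟨by omega, ?_, ?_⟩
  · rw [hlen, hhalf, Nat.log2_two_pow]
  · intro row hrow
    rw [pvStepB] at hrow
    simp only [List.mem_map] at hrow
    obtain ⟨i, _, hrow⟩ := hrow
    rw [← hrow, pvRowB, List.length_map, PySem.List.length_pyRange_one, hlen, hfd]
    omega

-- main invariant: with enough fuel, A's recursion equals B's loop on Pre_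
theorem go_eq : ∀ (f : Nat) (m : List (List Int)), Pre_sum_d_product m →
    m.length < f → pvGoA f m = sum_d_product_alt m := by
  intro f
  induction f with
  | zero => intro m _ h; omega
  | succ f ih =>
    intro m hpre hlt
    by_cases hn : m.length = 2
    · rw [pvGoA, if_pos hn, sum_d_product_alt, dif_neg (by omega)]
    · have h4 : 4 ≤ m.length := by
        obtain ⟨h2, hpow, _⟩ := hpre
        have hk2 : 2 ≤ Nat.log2 m.length := by
          by_contra h
          interval_cases h : Nat.log2 m.length <;> omega
        calc 4 = 2 ^ 2 := rfl
          _ ≤ 2 ^ Nat.log2 m.length := Nat.pow_le_pow_right (by norm_num) hk2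
          _ = m.length := hpow.symm
      have halt : sum_d_product_alt m = sum_d_product_alt (pvStepB m) := by
        conv_lhs => rw [sum_d_product_alt]
        rw [dif_pos (by omega : 2 < m.length)]
      rw [pvGoA, if_neg hn, pvAnsA_eq_pvStepB,
        ih (pvStepB m) (pre_step m hpre h4) (by rw [pvStepB_length]; omega), halt]

-- ===== VERDICT (by name: the statement is the Claim_ definition above) =====
theorem sum_d_product_spec : Claim_equal_sum_d_product := by
  intro m _ hpre
  unfold Spec_sum_d_product sum_d_product
  exact go_eq (m.length + 1) m hpre (by omega)
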